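-- pv_equiv track=rewrite | github.com/eastmountaincode/oligo-design-tool | oligo_designer_v3_2026_04_15/backend/oligo_designer.py | find_homopolymers
-- ===== SOURCE A (Python) =====
-- def find_homopolymers(seq: str, min_run: int = 5) -> list[tuple[int, int, str]]:
--     """Return list of (start, end, base) for homopolymer runs >= min_run."""
--     runs = []
--     s = seq.upper()
--     i = 0
--     while i < len(s):
--         j = i + 1
--         while j < len(s) and s[j] == s[i]:
--             j += 1
--         if j - i >= min_run:
--             runs.append((i, j, s[i]))
--         i = j
--     return runs
-- ===== SOURCE B (Python) =====
-- def find_homopolymers(seq: str, min_run: int = 5) -> list[tuple[int, int, str]]: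
--     """Return list of (start, end, base) for homopolymer runs >= min_run."""
--     s = seq.upper()
--     n = len(s)
--     if n == 0:
--         return []
--     bounds = [0] + [k for k in range(1, n) if s[k] != s[k - 1]] + [n]
--     return [(a, b, s[a]) for a, b in zip(bounds, bounds[1:]) if b - a >= min_run]
-- ===== Notes on version B (the rewrite author's own statement) =====
-- stated objective: alternative
-- what changed: Replaces A's online two-pointer scan (which finds each run's end and emits it immediately) by a staged pipeline: first compute the full list of run boundaries (indices where the character changes, plus 0 and n), then zip consecutive boundaries into (start, end) pairs and keep the long ones.
import Mathlib
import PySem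

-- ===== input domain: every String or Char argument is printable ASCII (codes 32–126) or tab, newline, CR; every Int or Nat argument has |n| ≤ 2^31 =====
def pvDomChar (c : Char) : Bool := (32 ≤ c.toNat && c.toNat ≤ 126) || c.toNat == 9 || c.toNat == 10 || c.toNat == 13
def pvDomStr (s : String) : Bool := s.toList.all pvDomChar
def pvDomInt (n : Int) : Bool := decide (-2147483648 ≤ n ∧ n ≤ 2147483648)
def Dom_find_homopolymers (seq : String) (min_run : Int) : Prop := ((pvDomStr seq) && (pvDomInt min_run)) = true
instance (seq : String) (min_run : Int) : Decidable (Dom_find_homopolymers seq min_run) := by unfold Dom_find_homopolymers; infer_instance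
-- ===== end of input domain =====

-- B replaces A's on-line two-pointer scan by a staged pipeline: first compute ALL run
-- boundaries (indices where the character changes), then pair consecutive boundaries
-- and keep the long runs (objective: alternative); return values proved equal.

-- ===== PORT A =====
-- inner while: advance j while j < len(s) and s[j] == s[i]
def pvFindRunEnd (s : List Char) (c : Char) (j : Nat) : Nat :=
  if h : j < s.length then
    if s[j] = c then pvFindRunEnd s c (j + 1) else j
  else j
termination_by s.length - j

-- j ≥ starting index (used for termination of the outer loop)
theorem pvFindRunEnd_ge (s : List Char) (c : Char) (j : Nat) : j ≤ pvFindRunEnd s c j := by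
  unfold pvFindRunEnd
  split
  · split
    · have := pvFindRunEnd_ge s c (j + 1); omega
    · exact le_refl _
  · exact le_refl _
termination_by s.length - j

-- outer while loop of A
def pvLoopA (s : List Char) (min_run : Int) (i : Nat) (runs : List (Int × Int × String)) :
    List (Int × Int × String) :=
  if h : i < s.length then
    let j := pvFindRunEnd s s[i] (i + 1)
    let runs' := if (j : Int) - i ≥ min_run then runs ++ [((i : Int), (j : Int), String.ofList [s[i]])] else runs
    pvLoopA s min_run j runs'
  else runs
termination_by s.length - i
decreasing_by
  have := pvFindRunEnd_ge s s[i] (i + 1); omega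

def find_homopolymers (seq : String) (min_run : Int) : List (Int × Int × String) :=
  pvLoopA (PySem.Str.upper seq).toList min_run 0 []

-- ===== PORT B =====
-- boundary predicate: s[k] != s[k-1]   (k always in 1..n-1, so pyGet? is exact here)
def pvBreakAt (s : List Char) (k : Int) : Bool :=
  decide (PySem.List.pyGet? s k ≠ PySem.List.pyGet? s (k - 1))

-- the final list comprehension: zip(bounds, bounds[1:]) filtered and mapped;
-- s[a] is always a valid index, so the getD default is never used (exact port)
def pvPairsB (s : List Char) (min_run : Int) (bounds : List Int) : List (Int × Int × String) :=
  ((bounds.zip bounds.tail).filter (fun p => decide (p.2 - p.1 ≥ min_run))).map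
    (fun p => (p.1, p.2, String.ofList [(PySem.List.pyGet? s p.1).getD 'A']))

def find_homopolymers_alt (seq : String) (min_run : Int) : List (Int × Int × String) :=
  let s := (PySem.Str.upper seq).toList
  let n : Int := s.length
  if s.length = 0 then []
  else
    let bounds : List Int := 0 :: ((PySem.List.pyRange 1 n 1).filter (pvBreakAt s) ++ [n])
    pvPairsB s min_run bounds

-- ===== PRECONDITION & SPEC =====
def Spec_find_homopolymers (seq : String) (min_run : Int) (out : List (Int × Int × String)) : Prop := out = find_homopolymers_alt seq min_run
instance (seq : String) (min_run : Int) (out : List (Int × Int × String)) : Decidable (Spec_find_homopolymers seq min_run out) := by unfold Spec_find_homopolymers; infer_instance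

-- ===== CLAIM (what is proved, stated in full; the proofs are below) =====
def Claim_equal_find_homopolymers : Prop := ∀ (seq : String) (min_run : Int), Dom_find_homopolymers seq min_run → Spec_find_homopolymers seq min_run (find_homopolymers seq min_run)

-- ===== LEMMAS AND PROOFS =====

-- boundaries strictly after position i, with the closing sentinel n
def pvBT (s : List Char) (i : Nat) : List Int :=
  (PySem.List.pyRange ((i : Int) + 1) (s.length : Int) 1).filter (pvBreakAt s) ++ [(s.length : Int)]

theorem pvPairsB_single (s : List Char) (m : Int) (a : Int) : pvPairsB s m [a] = [] := by
  simp [pvPairsB]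

theorem pvPairsB_cons (s : List Char) (m : Int) (a b : Int) (r : List Int) :
    pvPairsB s m (a :: b :: r) =
      (if b - a ≥ m then [(a, b, String.ofList [(PySem.List.pyGet? s a).getD 'A'])] else [])
        ++ pvPairsB s m (b :: r) := by
  simp only [pvPairsB, List.tail_cons, List.zip_cons_cons, List.filter_cons]
  by_cases h : b - a ≥ m <;> simp [h]

-- the inner while computes start index + takeWhile length on the remaining suffix
theorem pvFindRunEnd_eq (s : List Char) (c : Char) (j : Nat) :
    pvFindRunEnd s c j = j + ((s.drop j).takeWhile (· = c)).length := by
  unfold pvFindRunEnd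
  split
  · rename_i h
    have hd : s.drop j = s[j] :: s.drop (j + 1) := List.drop_eq_getElem_cons h
    split
    · rename_i heq
      have := pvFindRunEnd_eq s c (j + 1)
      rw [this, hd]
      simp [heq]
      omega
    · rename_i hne
      rw [hd]
      simp [hne]
  · rename_i h
    have : s.drop j = [] := List.drop_eq_nil_of_le (by omega)
    simp [this]
termination_by s.length - j

-- characterisation of the run end: everything in [i, j) equals s[i], and s[j] differs (if any)
theorem pvRunEnd_all (s : List Char) (i : Nat) (hi : i < s.length) :
    ∀ k : Nat, i ≤ k → k < pvFindRunEnd s s[i] (i + 1) → ∀ (hk : k < s.length), s[k] = s[i] := by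
  intro k hik hkj hk
  rcases Nat.eq_or_lt_of_le hik with h | h
  · subst h; rfl
  · rw [pvFindRunEnd_eq] at hkj
    have hdrop : k - (i + 1) < ((s.drop (i + 1)).takeWhile (· = s[i])).length := by omega
    have hmem : ((s.drop (i+1)).takeWhile (· = s[i]))[k - (i+1)] ∈ (s.drop (i+1)).takeWhile (· = s[i]) :=
      List.getElem_mem hdrop
    have heq : ((s.drop (i+1)).takeWhile (· = s[i]))[k - (i+1)] = s[i] := by
      have := List.mem_takeWhile_imp hmem
      simpa using this
    have hidx : ((s.drop (i+1)).takeWhile (· = s[i]))[k - (i+1)] = s[k] := by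
      rw [List.IsPrefix.getElem (List.takeWhile_prefix _) hdrop, List.getElem_drop]
      congr 1
      omega
    rw [← hidx, heq]

theorem pvRunEnd_stop (s : List Char) (c : Char) (j : Nat) :
    ∀ x, s[pvFindRunEnd s c j]? = some x → x ≠ c := by
  unfold pvFindRunEnd
  split
  · split
    · exact pvRunEnd_stop s c (j + 1)
    · rename_i hlt hne
      intro x hx
      rw [List.getElem?_eq_getElem hlt] at hx
      cases hx
      exact hne
  · rename_i hge
    intro x hx
    rw [List.getElem?_eq_none (by omega)] at hx
    cases hx
termination_by s.length - j

theorem pvRunEnd_le (s : List Char) (c : Char) (j : Nat) (hj : j ≤ s.length) :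
    pvFindRunEnd s c j ≤ s.length := by
  unfold pvFindRunEnd
  split
  · split
    · exact pvRunEnd_le s c (j + 1) (by omega)
    · exact hj
  · exact hj
termination_by s.length - j

-- key lemma: from a run start i, the boundary list begins with the run end j
theorem pvBT_step (s : List Char) (i : Nat) (hi : i < s.length) :
    pvBT s i = (if h : pvFindRunEnd s s[i] (i + 1) < s.length
                then ((pvFindRunEnd s s[i] (i + 1) : Int)) :: pvBT s (pvFindRunEnd s s[i] (i + 1))
                else [(s.length : Int)]) := by
  set j := pvFindRunEnd s s[i] (i + 1) with hjdef
  have hij : i + 1 ≤ j := pvFindRunEnd_ge s s[i] (i + 1)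
  have hjn : j ≤ s.length := pvRunEnd_le s s[i] (i + 1) (by omega)
  have hsplit : PySem.List.pyRange ((i : Int) + 1) (s.length : Int) 1
      = PySem.List.pyRange ((i : Int) + 1) (j : Int) 1 ++ PySem.List.pyRange (j : Int) (s.length : Int) 1 :=
    PySem.List.pyRange_one_append _ _ _ (by exact_mod_cast hij) (by exact_mod_cast hjn)
  have hfirst : (PySem.List.pyRange ((i : Int) + 1) (j : Int) 1).filter (pvBreakAt s) = [] := by
    rw [List.filter_eq_nil_iff]
    intro k hk
    rw [PySem.List.mem_pyRange_one] at hk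
    obtain ⟨hk1, hk2⟩ := hk
    have hk0 : 0 ≤ k := by omega
    have hklt : k.toNat < s.length := by omega
    have hk1lt : k.toNat - 1 < s.length := by omega
    have htn : (k - 1).toNat = k.toNat - 1 := by omega
    simp only [pvBreakAt, decide_eq_true_eq, Decidable.not_not]
    rw [PySem.List.pyGet?_of_nonneg _ hk0, PySem.List.pyGet?_of_nonneg _ (by omega : (0:Int) ≤ k - 1),
        htn, List.getElem?_eq_getElem hklt, List.getElem?_eq_getElem hk1lt]
    have h1 : s[k.toNat] = s[i] := pvRunEnd_all s i hi k.toNat (by omega) (by omega) hklt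
    have h2 : s[k.toNat - 1] = s[i] := pvRunEnd_all s i hi (k.toNat - 1) (by omega) (by omega) hk1lt
    rw [h1, h2]
  split
  · rename_i h
    have hcons : PySem.List.pyRange (j : Int) (s.length : Int) 1
        = (j : Int) :: PySem.List.pyRange ((j : Int) + 1) (s.length : Int) 1 :=
      PySem.List.pyRange_one_cons (by exact_mod_cast h)
    have hbreak : pvBreakAt s (j : Int) = true := by
      have hj1 : ((j : Int) - 1).toNat = j - 1 := by omega
      simp only [pvBreakAt, decide_eq_true_eq]
      rw [PySem.List.pyGet?_natCast, PySem.List.pyGet?_of_nonneg _ (by omega : (0:Int) ≤ (j:Int) - 1),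
          hj1, List.getElem?_eq_getElem h, List.getElem?_eq_getElem (show j - 1 < s.length by omega)]
      have h1 : s[j - 1] = s[i] := pvRunEnd_all s i hi (j - 1) (by omega) (by omega) (by omega)
      have h2 : s[j] ≠ s[i] := pvRunEnd_stop s s[i] (i + 1) s[j] (List.getElem?_eq_getElem h)
      simp [h1]
      exact fun hc => h2 hc
    unfold pvBT
    rw [hsplit, List.filter_append, hfirst, hcons, List.filter_cons, hbreak]
    simp
  · rename_i h
    have hjeq : j = s.length := by omega
    unfold pvBT
    rw [hsplit, List.filter_append, hfirst]
    rw [hjeq]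
    rw [PySem.List.pyRange_one_eq_nil (by omega)]
    simp

-- main invariant: A's loop from index i equals runs ++ B's pairing of i's boundary list
theorem pvLoop_eq (s : List Char) (m : Int) (i : Nat) (hi : i < s.length)
    (runs : List (Int × Int × String)) :
    pvLoopA s m i runs = runs ++ pvPairsB s m ((i : Int) :: pvBT s i) := by
  unfold pvLoopA
  split
  · rename_i h
    set j := pvFindRunEnd s s[i] (i + 1) with hjdef
    have hij : i + 1 ≤ j := pvFindRunEnd_ge s s[i] (i + 1)
    have hjn : j ≤ s.length := pvRunEnd_le s s[i] (i + 1) (by omega)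
    have hchar : (PySem.List.pyGet? s (i : Int)).getD 'A' = s[i] := by
      rw [PySem.List.pyGet?_natCast, List.getElem?_eq_getElem h]
      rfl
    have hBT := pvBT_step s i h
    rw [← hjdef] at hBT
    show pvLoopA s m j
        (if (j : Int) - i ≥ m then runs ++ [((i : Int), (j : Int), String.ofList [s[i]])] else runs)
      = runs ++ pvPairsB s m ((i : Int) :: pvBT s i)
    by_cases hjlt : j < s.length
    · rw [dif_pos hjlt] at hBT
      rw [hBT, pvPairsB_cons, hchar]
      by_cases hmin : (j : Int) - i ≥ m
      · rw [if_pos hmin, pvLoop_eq s m j hjlt, if_pos hmin]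
        simp
      · rw [if_neg hmin, pvLoop_eq s m j hjlt, if_neg hmin]
        simp
    · rw [dif_neg hjlt] at hBT
      rw [hBT, pvPairsB_cons, hchar, pvPairsB_single]
      have hstop : ∀ r : List (Int × Int × String), pvLoopA s m j r = r := by
        intro r
        unfold pvLoopA
        rw [dif_neg (by omega)]
      rw [hstop]
      have hji : (j : Int) = (s.length : Int) := by omega
      rw [hji]
      by_cases hmin : ((s.length : Int)) - i ≥ m
      · rw [if_pos hmin, if_pos hmin]
        simp
      · rw [if_neg hmin, if_neg hmin]
        simp
  · rename_i h
    exact absurd hi h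
termination_by s.length - i
decreasing_by
  all_goals rw [← hjdef]; omega

-- ===== VERDICT (by name: the statement is the Claim_ definition above) =====
theorem find_homopolymers_spec : Claim_equal_find_homopolymers := by
  intro seq min_run _
  unfold Spec_find_homopolymers find_homopolymers find_homopolymers_alt
  set s := (PySem.Str.upper seq).toList with hs
  by_cases hlen : s.length = 0
  · simp only [if_pos hlen]
    unfold pvLoopA
    rw [dif_neg (by omega)]
  · simp only [if_neg hlen]
    have := pvLoop_eq s min_run 0 (Nat.pos_of_ne_zero hlen) []
    rw [this]
    unfold pvBT
    norm_num
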